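-- pv_equiv track=rewrite | github.com/909ma/Repository-for-Study | 프로그래머스/python/왼쪽 오른쪽.py | solution
-- ===== SOURCE A (Python) =====
-- def solution(str_list):
--     answer = []
--     for i in range(len(str_list)):
--         item = str_list[i]
--         if item == 'l':
--             answer = str_list[:i]
--             break
--         elif item == 'r':
--             answer = str_list[i+1:]
--             break
--     return answer
-- ===== SOURCE B (Python) =====
-- def solution(str_list):
--     try:
--         li = str_list.index('l')
--     except ValueError:
--         li = None
--     try:
--         ri = str_list.index('r')
--     except ValueError:
--         ri = None
--     if li is None:
--         return [] if ri is None else str_list[ri+1:]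
--     if ri is None or li < ri:
--         return str_list[:li]
--     return str_list[ri+1:]
-- ===== Notes on version B (the rewrite author's own statement) =====
-- stated objective: alternative
-- what changed: Replaces A's single indexed scan with early break by two .index lookups (with ValueError handling) and an explicit comparison of the two positions to decide which slice to return.
import Mathlib
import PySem

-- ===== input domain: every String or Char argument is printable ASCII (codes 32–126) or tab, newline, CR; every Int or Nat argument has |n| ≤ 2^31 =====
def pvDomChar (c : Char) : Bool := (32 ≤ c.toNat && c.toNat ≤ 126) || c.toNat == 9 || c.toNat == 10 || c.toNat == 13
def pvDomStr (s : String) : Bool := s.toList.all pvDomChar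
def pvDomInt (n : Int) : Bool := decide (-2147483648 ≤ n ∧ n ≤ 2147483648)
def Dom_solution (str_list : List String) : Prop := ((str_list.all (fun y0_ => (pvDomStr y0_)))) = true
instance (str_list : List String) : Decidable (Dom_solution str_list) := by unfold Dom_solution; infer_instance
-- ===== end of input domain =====

-- B replaces A's single early-break scan by two .index lookups and a position comparison (alternative decomposition, same cost).
-- ===== PORT A =====
def solutionLoop (str_list : List String) (i : Nat) : List String :=
  if h : i < str_list.length then
    let item := str_list[i]
    if item = "l" then PySem.List.slice str_list none (some (i : Int))
    else if item = "r" then PySem.List.slice str_list (some ((i : Int) + 1)) none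
    else solutionLoop str_list (i + 1)
  else []
termination_by str_list.length - i

def solution (str_list : List String) : List String := solutionLoop str_list 0

-- ===== PORT B =====
def solution_alt (str_list : List String) : List String :=
  let li := PySem.List.index? str_list "l"
  let ri := PySem.List.index? str_list "r"
  match li, ri with
  | none, none => []
  | none, some r => PySem.List.slice str_list (some ((r : Int) + 1)) none
  | some l, none => PySem.List.slice str_list none (some (l : Int))
  | some l, some r =>
      if l < r then PySem.List.slice str_list none (some (l : Int))
      else PySem.List.slice str_list (some ((r : Int) + 1)) none

-- ===== PRECONDITION & SPEC =====
def Spec_solution (str_list : List String) (out : List String) : Prop := out = solution_alt str_list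
instance (str_list : List String) (out : List String) : Decidable (Spec_solution str_list out) := by unfold Spec_solution; infer_instance

-- ===== CLAIM (what is proved, stated in full; the proofs are below) =====
def Claim_equal_solution : Prop := ∀ (str_list : List String), Dom_solution str_list → Spec_solution str_list (solution str_list)

-- ===== LEMMAS AND PROOFS =====

-- ===== VERDICT (by name: the statement is the Claim_ definition above) =====
-- index? returns exactly the position of the first occurrence.
theorem index?_of_first (l : List String) (v : String) (i : Nat) (hi : i < l.length)
    (hv : l[i] = v) (hfirst : ∀ j (hj : j < l.length), j < i → l[j] ≠ v) :
    PySem.List.index? l v = some i := by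
  have hmem : v ∈ l := hv ▸ l.getElem_mem hi
  rcases Option.isSome_iff_exists.mp ((PySem.List.index?_isSome_iff l v).mpr hmem) with ⟨k, hk⟩
  obtain ⟨hkl, hkv, hkmin⟩ := PySem.List.getElem_of_index?_eq_some hk
  rcases Nat.lt_trichotomy k i with h | h | h
  · exact absurd hkv (hfirst k hkl h)
  · exact h ▸ hk
  · exact absurd hv (hkmin i h)

theorem loop_eq (n : Nat) : ∀ (l : List String) (i : Nat), l.length - i ≤ n →
    (∀ j (hj : j < l.length), j < i → l[j] ≠ "l" ∧ l[j] ≠ "r") →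
    solutionLoop l i = solution_alt l := by
  induction n with
  | zero =>
    intro l i hn hfirst
    have hge : l.length ≤ i := by omega
    rw [solutionLoop]
    simp only [dif_neg (by omega : ¬ i < l.length)]
    have hl : PySem.List.index? l "l" = none := by
      rw [PySem.List.index?_eq_none_iff]
      intro hmem
      rcases List.mem_iff_getElem.mp hmem with ⟨j, hj, hjv⟩
      exact (hfirst j hj (by omega)).1 hjv
    have hr : PySem.List.index? l "r" = none := by
      rw [PySem.List.index?_eq_none_iff]
      intro hmem
      rcases List.mem_iff_getElem.mp hmem with ⟨j, hj, hjv⟩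
      exact (hfirst j hj (by omega)).2 hjv
    rw [PySem.List.index?_eq_idxOf?] at hl hr
    simp [solution_alt, hl, hr]
  | succ n ih =>
    intro l i hn hfirst
    by_cases h : i < l.length
    · rw [solutionLoop]
      simp only [dif_pos h]
      by_cases hL : l[i] = "l"
      · have hidx : PySem.List.index? l "l" = some i :=
          index?_of_first l "l" i h hL (fun j hj hji => (hfirst j hj hji).1)
        simp only [if_pos hL]
        cases hridx : PySem.List.index? l "r" with
        | none =>
          rw [PySem.List.index?_eq_idxOf?] at hidx hridx
          simp [solution_alt, hidx, hridx]
        | some r =>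
          obtain ⟨hrl, hrv, hrmin⟩ := PySem.List.getElem_of_index?_eq_some hridx
          have hir : i < r := by
            rcases Nat.lt_trichotomy r i with h1 | h1 | h1
            · exact absurd hrv (hfirst r hrl h1).2
            · subst h1; rw [hL] at hrv; simp at hrv
            · exact h1
          rw [PySem.List.index?_eq_idxOf?] at hidx hridx
          simp [solution_alt, hidx, hridx, hir]
      · by_cases hR : l[i] = "r"
        · have hidx : PySem.List.index? l "r" = some i :=
            index?_of_first l "r" i h hR (fun j hj hji => (hfirst j hj hji).2)
          simp only [if_neg hL, if_pos hR]
          cases hlidx : PySem.List.index? l "l" with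
          | none =>
            rw [PySem.List.index?_eq_idxOf?] at hidx hlidx
            simp [solution_alt, hidx, hlidx]
          | some k =>
            obtain ⟨hkl, hkv, hkmin⟩ := PySem.List.getElem_of_index?_eq_some hlidx
            have hik : i < k := by
              rcases Nat.lt_trichotomy k i with h1 | h1 | h1
              · exact absurd hkv (hfirst k hkl h1).1
              · subst h1; exact absurd hkv hL
              · exact h1
            rw [PySem.List.index?_eq_idxOf?] at hidx hlidx
            simp [solution_alt, hidx, hlidx, Nat.not_lt.mpr (Nat.le_of_lt hik)]
        · simp only [if_neg hL, if_neg hR]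
          exact ih l (i + 1) (by omega) (fun j hj hji => by
            rcases Nat.lt_or_ge j i with h1 | h1
            · exact hfirst j hj h1
            · have : j = i := by omega
              subst this; exact ⟨hL, hR⟩)
    · rw [solutionLoop]
      simp only [dif_neg h]
      have hl : PySem.List.index? l "l" = none := by
        rw [PySem.List.index?_eq_none_iff]
        intro hmem
        rcases List.mem_iff_getElem.mp hmem with ⟨j, hj, hjv⟩
        exact (hfirst j hj (by omega)).1 hjv
      have hr : PySem.List.index? l "r" = none := by
        rw [PySem.List.index?_eq_none_iff]
        intro hmem
        rcases List.mem_iff_getElem.mp hmem with ⟨j, hj, hjv⟩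
        exact (hfirst j hj (by omega)).2 hjv
      rw [PySem.List.index?_eq_idxOf?] at hl hr
      simp [solution_alt, hl, hr]

theorem solution_spec : Claim_equal_solution := by
  intro l _
  unfold Spec_solution solution
  exact loop_eq l.length l 0 (by omega) (fun j hj hji => by omega)
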